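-- pv_equiv track=rewrite | github.com/yuutasilver-sketch/veu_bot | ranking.py | sort_missoes
-- ===== SOURCE A (Python) =====
-- def sort_missoes(missoes: dict):
--     ranking = []
--
--     for uid, data in missoes.items():
--         total = 0
--         for nome in ["mensagens", "evento", "evento_raro", "fragmentos", "call", "semanal"]:
--             if nome in data and data[nome].get("concluida"):
--                 total += 1
--         ranking.append((uid, total))
--
--     return sorted(ranking, key=lambda x: x[1], reverse=True)
-- ===== SOURCE B (Python) =====
-- def sort_missoes(missoes: dict):
--     names = ["mensagens", "evento", "evento_raro", "fragmentos", "call", "semanal"]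
--     ranking = [(uid, sum(1 if n in data and data[n].get("concluida") else 0 for n in names))
--                for uid, data in missoes.items()]
--     return [p for t in range(6, -1, -1) for p in ranking if p[1] == t]
-- ===== Notes on version B (the rewrite author's own statement) =====
-- stated objective: alternative
-- what changed: Replaced the comparison sort (sorted by count, reverse=True) with a counting sort over the bounded key range 0..6: the ranking is built by a comprehension in one pass and the output is produced by seven stable filter passes for t = 6 down to 0, which reproduces Python's stable reverse sort exactly.
import Mathlib
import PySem

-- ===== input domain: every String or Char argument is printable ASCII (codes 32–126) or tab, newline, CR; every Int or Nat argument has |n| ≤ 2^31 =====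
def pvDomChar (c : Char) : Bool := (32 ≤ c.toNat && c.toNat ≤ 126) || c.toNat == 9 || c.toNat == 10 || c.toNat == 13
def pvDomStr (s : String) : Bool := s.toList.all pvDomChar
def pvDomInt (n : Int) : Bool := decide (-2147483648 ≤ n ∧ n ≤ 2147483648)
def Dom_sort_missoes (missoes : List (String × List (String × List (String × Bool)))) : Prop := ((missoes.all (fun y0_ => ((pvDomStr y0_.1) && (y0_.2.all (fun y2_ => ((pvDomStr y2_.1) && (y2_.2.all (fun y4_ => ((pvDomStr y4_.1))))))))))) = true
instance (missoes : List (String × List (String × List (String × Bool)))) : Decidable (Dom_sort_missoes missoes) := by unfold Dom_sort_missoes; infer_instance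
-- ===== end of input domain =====

-- B replaces the reverse comparison sort by a counting sort over the bounded key range 0..6 (seven stable filter passes); same return value by stability, not measurably faster.

-- ===== PORT A =====
-- the fixed mission-name list of A's inner loop
def pvNames : List String := ["mensagens", "evento", "evento_raro", "fragmentos", "call", "semanal"]

-- 'nome in data and data[nome].get("concluida")' (data and data[nome] are Python dicts)
def pvConcluida (data : List (String × List (String × Bool))) (nome : String) : Bool :=
  match (PySem.Dict.ofList data).get? nome with
  | some sub => ((PySem.Dict.ofList sub).get? "concluida").getD false
  | none => false

def sort_missoes (missoes : List (String × List (String × List (String × Bool)))) : List (String × Int) :=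
  let ranking := (PySem.Dict.ofList missoes).items.foldl (fun acc it =>
    let total := pvNames.foldl (fun t nome => if pvConcluida it.2 nome then t + 1 else t) (0 : Int)
    acc ++ [(it.1, total)]) []
  PySem.List.sorted ranking (fun x => x.2) true

-- ===== PORT B =====
def sort_missoes_alt (missoes : List (String × List (String × List (String × Bool)))) : List (String × Int) :=
  let ranking := (PySem.Dict.ofList missoes).items.map (fun it =>
    (it.1, (pvNames.map (fun nome => if pvConcluida it.2 nome then (1 : Int) else 0)).sum))
  (PySem.List.pyRange 6 (-1) (-1)).flatMap (fun t => ranking.filter (fun p => p.2 == t))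

-- ===== PRECONDITION & SPEC =====
def Spec_sort_missoes (missoes : List (String × List (String × List (String × Bool)))) (out : List (String × Int)) : Prop := out = sort_missoes_alt missoes
instance (missoes : List (String × List (String × List (String × Bool)))) (out : List (String × Int)) : Decidable (Spec_sort_missoes missoes out) := by unfold Spec_sort_missoes; infer_instance

-- ===== CLAIM (what is proved, stated in full; the proofs are below) =====
def Claim_equal_sort_missoes : Prop := ∀ (missoes : List (String × List (String × List (String × Bool)))), Dom_sort_missoes missoes → Spec_sort_missoes missoes (sort_missoes missoes)

-- ===== LEMMAS AND PROOFS =====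

-- the bucket concatenation: for each key t in ks (in order), the elements of r with snd = t, in order
def pvCat (ks : List Int) (r : List (String × Int)) : List (String × Int) :=
  ks.flatMap (fun t => r.filter (fun p => p.2 == t))

theorem pvCat_nil (ks : List Int) : pvCat ks [] = [] := by
  simp [pvCat]

theorem insertBy_pass {α : Type} (before : α → α → Bool) (x : α) (ys zs : List α)
    (h : ∀ y ∈ ys, before x y = false) :
    PySem.List.insertBy before x (ys ++ zs) = ys ++ PySem.List.insertBy before x zs := by
  induction ys with
  | nil => simp
  | cons y t ih =>
    have hy : before x y = false := h y (by simp)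
    simp [PySem.List.insertBy, hy, ih (fun z hz => h z (by simp [hz]))]

theorem insertBy_head {α : Type} (before : α → α → Bool) (x : α) (zs : List α)
    (h : ∀ y ∈ zs, before x y = true) :
    PySem.List.insertBy before x zs = x :: zs := by
  cases zs with
  | nil => rfl
  | cons z t => simp [PySem.List.insertBy, h z (by simp)]

theorem mem_pvCat_snd (ks : List Int) (r : List (String × Int)) (y : String × Int)
    (hy : y ∈ pvCat ks r) : y.2 ∈ ks := by
  simp only [pvCat, List.mem_flatMap, List.mem_filter] at hy
  obtain ⟨t, ht, _, he⟩ := hy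
  simpa [beq_iff_eq.mp he] using ht

theorem pvCat_cons (t : Int) (ks : List Int) (r : List (String × Int)) :
    pvCat (t :: ks) r = r.filter (fun p => p.2 == t) ++ pvCat ks r := rfl

theorem pvCat_append_notmem (ks : List Int) (p : List (String × Int)) (x : String × Int)
    (hx : x.2 ∉ ks) : pvCat ks (p ++ [x]) = pvCat ks p := by
  induction ks with
  | nil => rfl
  | cons t rest ih =>
    have hne : (x.2 == t) = false := beq_eq_false_iff_ne.mpr (fun h => hx (by simp [h]))
    rw [pvCat_cons, pvCat_cons, ih (fun h => hx (by simp [h])), List.filter_append]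
    simp [hne]

theorem insertBy_pvCat (ks : List Int) (hks : ks.Pairwise (· > ·))
    (x : String × Int) (hx : x.2 ∈ ks) (p : List (String × Int)) :
    PySem.List.insertBy (fun a b => decide (b.2 < a.2)) x (pvCat ks p)
      = pvCat ks (p ++ [x]) := by
  induction ks with
  | nil => simp at hx
  | cons t rest ih =>
    have hrest : rest.Pairwise (· > ·) := hks.tail
    have hlt : ∀ s ∈ rest, s < t := fun s hs => (List.pairwise_cons.mp hks).1 s hs
    rw [pvCat_cons, pvCat_cons]
    by_cases hxt : x.2 = t
    · -- x goes to the end of the first bucket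
      have hxnot : x.2 ∉ rest := fun h => by have := hlt _ h; omega
      have h1 : ∀ y ∈ p.filter (fun q => q.2 == t), (fun a b => decide (b.2 < a.2)) x y = false := by
        intro y hy
        have := beq_iff_eq.mp (List.mem_filter.mp hy).2
        simp [this, hxt]
      have h2 : ∀ y ∈ pvCat rest p, (fun a b => decide (b.2 < a.2)) x y = true := by
        intro y hy
        have := hlt y.2 (mem_pvCat_snd rest p y hy)
        simp only [decide_eq_true_eq]
        omega
      rw [insertBy_pass _ _ _ _ h1, insertBy_head _ _ _ h2,
          pvCat_append_notmem rest p x hxnot, List.filter_append]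
      simp [hxt]
    · -- x belongs to a later bucket: pass through the first one
      have hxrest : x.2 ∈ rest := by
        cases List.mem_cons.mp hx with
        | inl h => exact absurd h hxt
        | inr h => exact h
      have hxlt : x.2 < t := hlt _ hxrest
      have h1 : ∀ y ∈ p.filter (fun q => q.2 == t), (fun a b => decide (b.2 < a.2)) x y = false := by
        intro y hy
        have := beq_iff_eq.mp (List.mem_filter.mp hy).2
        simp only [decide_eq_false_iff_not]
        omega
      rw [insertBy_pass _ _ _ _ h1, ih hrest hxrest, List.filter_append]
      simp [hxt]

theorem foldl_insertBy_pvCat (ks : List Int) (hks : ks.Pairwise (· > ·))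
    (xs p : List (String × Int)) (hxs : ∀ x ∈ xs, x.2 ∈ ks) :
    xs.foldl (fun acc x => PySem.List.insertBy (fun a b => decide (b.2 < a.2)) x acc) (pvCat ks p)
      = pvCat ks (p ++ xs) := by
  induction xs generalizing p with
  | nil => simp
  | cons x t ih =>
    simp only [List.foldl_cons]
    rw [insertBy_pvCat ks hks x (hxs x (by simp)) p,
        ih (p ++ [x]) (fun y hy => hxs y (by simp [hy]))]
    simp

theorem sorted_eq_pvCat (ks : List Int) (hks : ks.Pairwise (· > ·))
    (xs : List (String × Int)) (hxs : ∀ x ∈ xs, x.2 ∈ ks) :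
    PySem.List.sorted xs (fun x => x.2) true = pvCat ks xs := by
  rw [PySem.List.sorted_rev_eq_foldl_insertBy]
  have := foldl_insertBy_pvCat ks hks xs [] hxs
  simpa [pvCat_nil] using this

-- A's counting loop is the filter length
theorem foldl_count_eq (l : List String) (c : String → Bool) (a : Int) :
    l.foldl (fun t nome => if c nome then t + 1 else t) a = a + ((l.filter c).length : Int) := by
  induction l generalizing a with
  | nil => simp
  | cons x t ih =>
    by_cases hx : c x <;> simp [List.filter, hx, ih] <;> omega

-- B's 0/1 sum is the filter length too
theorem sum_ite_eq (l : List String) (c : String → Bool) :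
    (l.map (fun nome => if c nome then (1 : Int) else 0)).sum = ((l.filter c).length : Int) := by
  induction l with
  | nil => simp
  | cons x t ih =>
    by_cases hx : c x <;> simp [List.filter, hx, ih] <;> omega

-- the ranking fold is a map
theorem foldl_append_map {α β : Type} (xs : List α) (f : α → β) (a : List β) :
    xs.foldl (fun acc x => acc ++ [f x]) a = a ++ xs.map f := by
  induction xs generalizing a with
  | nil => simp
  | cons x t ih => simp [ih]

-- ===== VERDICT (by name: the statement is the Claim_ definition above) =====
theorem sort_missoes_spec : Claim_equal_sort_missoes := by
  intro missoes _
  unfold Spec_sort_missoes sort_missoes sort_missoes_alt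
  set items := (PySem.Dict.ofList missoes).items with hitems
  set r := items.map (fun it =>
        (it.1, ((pvNames.filter (fun nome => pvConcluida it.2 nome)).length : Int))) with hr
  -- A's ranking fold is the mapped list r
  have hrank : items.foldl (fun acc it =>
        acc ++ [(it.1, pvNames.foldl (fun t nome => if pvConcluida it.2 nome then t + 1 else t) (0 : Int))]) []
      = r := by
    rw [foldl_append_map items _ [], hr]
    simp only [List.nil_append]
    apply List.map_congr_left
    intro it _
    rw [foldl_count_eq]
    simp
  -- B's comprehension ranking is the same list r
  have hrankB : items.map (fun it =>
        (it.1, (pvNames.map (fun nome => if pvConcluida it.2 nome then (1 : Int) else 0)).sum))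
      = r := by
    rw [hr]
    apply List.map_congr_left
    intro it _
    rw [sum_ite_eq]
  -- every count lies in 0..6
  have hbound : ∀ x ∈ r, x.2 ∈ ([6, 5, 4, 3, 2, 1, 0] : List Int) := by
    intro x hx
    rw [hr] at hx
    obtain ⟨it, _, rfl⟩ := List.mem_map.mp hx
    have hlen : (pvNames.filter (fun nome => pvConcluida it.2 nome)).length ≤ pvNames.length :=
      List.length_filter_le _ _
    have h6 : (pvNames.filter (fun nome => pvConcluida it.2 nome)).length ≤ 6 := by
      simpa [pvNames] using hlen
    simp only [List.mem_cons, List.not_mem_nil, or_false]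
    omega
  have hrange : PySem.List.pyRange 6 (-1) (-1) = ([6, 5, 4, 3, 2, 1, 0] : List Int) := by decide
  rw [hrank, hrankB, hrange,
      sorted_eq_pvCat [6, 5, 4, 3, 2, 1, 0] (by decide) r hbound]
  rfl
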